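-- pv_equiv track=rewrite | github.com/Glebias/Support-System | lab7/main.py | diag_index_to_coords
-- ===== SOURCE A (Python) =====
-- def diag_index_to_coords(k: int, N: int) -> tuple[int, int]:
--     if k < 0 or k >= N * N:
--         raise IndexError(f"Index k={k} out of range for N={N}")
--     coords = []
--     for d in range(2 * N - 1):
--         start_i = max(0, d - (N - 1))
--         end_i = min(N - 1, d)
--         diag = [(i, d - i) for i in range(start_i, end_i + 1)]
--         if d % 2 == 1:
--             diag.reverse()
--         coords.extend(diag)
--     return coords[k]
-- ===== SOURCE B (Python) =====
-- def diag_index_to_coords(k: int, N: int) -> tuple[int, int]: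
--     if k < 0 or k >= N * N:
--         raise IndexError(f"Index k={k} out of range for N={N}")
--     c = 0
--     for d in range(2 * N - 1):
--         start_i = max(0, d - (N - 1))
--         end_i = min(N - 1, d)
--         length = end_i - start_i + 1
--         if k < c + length:
--             r = k - c
--             i = start_i + r if d % 2 == 0 else end_i - r
--             return (i, d - i)
--         c += length
-- ===== Notes on version B (the rewrite author's own statement) =====
-- stated objective: faster
-- what changed: Instead of materialising the whole N^2-element traversal and indexing it, B accumulates diagonal lengths to locate k's diagonal and computes the coordinate there directly.
import Mathlib
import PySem

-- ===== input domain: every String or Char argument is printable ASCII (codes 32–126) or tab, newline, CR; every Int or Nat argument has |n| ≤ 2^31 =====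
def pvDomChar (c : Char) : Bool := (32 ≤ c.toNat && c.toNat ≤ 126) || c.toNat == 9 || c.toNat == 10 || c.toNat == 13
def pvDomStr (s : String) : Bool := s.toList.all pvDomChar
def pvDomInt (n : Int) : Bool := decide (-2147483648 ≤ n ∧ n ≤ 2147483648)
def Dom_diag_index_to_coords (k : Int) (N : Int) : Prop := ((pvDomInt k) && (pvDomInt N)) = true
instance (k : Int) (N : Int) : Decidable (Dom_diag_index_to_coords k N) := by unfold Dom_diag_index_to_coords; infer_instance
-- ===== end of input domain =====

-- B replaces A's full O(N^2) materialisation of the traversal with an O(N) scan over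
-- diagonal lengths that computes the k-th coordinate directly (return value only).

-- ===== PORT A =====
-- one diagonal of A's loop body: the comprehension, reversed when d is odd
def pvDiagA (N d : Int) : List (Int × Int) :=
  let start_i := max 0 (d - (N - 1))
  let end_i := min (N - 1) d
  let diag := (PySem.List.pyRange start_i (end_i + 1) 1).map (fun i => (i, d - i))
  if PySem.Int.mod d 2 == 1 then diag.reverse else diag

def diag_index_to_coords (k : Int) (N : Int) : Int × Int :=
  if k < 0 || N * N ≤ k then (0, 0)  -- Python raises IndexError here; excluded by Pre_
  else
    let coords := (PySem.List.pyRange 0 (2 * N - 1) 1).foldl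
      (fun acc d => acc ++ pvDiagA N d) []
    (PySem.List.pyGet? coords k).getD (0, 0)

-- ===== PORT B =====
-- B's loop: accumulate diagonal lengths c until k's diagonal is reached
def pvAltGo (N k : Int) : Int → List Int → Int × Int
  | _, [] => (0, 0)  -- unreachable for k in range (Python B returns inside the loop)
  | c, d :: ds =>
    let start_i := max 0 (d - (N - 1))
    let end_i := min (N - 1) d
    let len := end_i - start_i + 1
    if k < c + len then
      let r := k - c
      let i := if PySem.Int.mod d 2 == 0 then start_i + r else end_i - r
      (i, d - i)
    else pvAltGo N k (c + len) ds

def diag_index_to_coords_alt (k : Int) (N : Int) : Int × Int :=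
  if k < 0 || N * N ≤ k then (0, 0)  -- Python raises IndexError here; excluded by Pre_
  else pvAltGo N k 0 (PySem.List.pyRange 0 (2 * N - 1) 1)

-- ===== PRECONDITION & SPEC =====
-- exactly the inputs on which A returns normally (for k outside [0, N*N) it raises
-- IndexError at the guard; for negative N with 0 ≤ k < N*N the traversal is empty and
-- A's coords[k] raises IndexError, while B returns None, not a tuple)
def Pre_diag_index_to_coords (k : Int) (N : Int) : Prop := 0 ≤ k ∧ k < N * N ∧ 0 ≤ N
instance (k : Int) (N : Int) : Decidable (Pre_diag_index_to_coords k N) := by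
  unfold Pre_diag_index_to_coords; infer_instance

def pvWitness_diag_index_to_coords : Int × Int := (3, 3)

def Spec_diag_index_to_coords (k : Int) (N : Int) (out : Int × Int) : Prop :=
  out = diag_index_to_coords_alt k N
instance (k : Int) (N : Int) (out : Int × Int) : Decidable (Spec_diag_index_to_coords k N out) := by
  unfold Spec_diag_index_to_coords; infer_instance

-- ===== CLAIM (what is proved, stated in full; the proofs are below) =====
def Claim_equal_diag_index_to_coords : Prop := ∀ (k : Int) (N : Int),
  Dom_diag_index_to_coords k N → Pre_diag_index_to_coords k N →
  Spec_diag_index_to_coords k N (diag_index_to_coords k N)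

-- ===== LEMMAS AND PROOFS =====

theorem pvDiagA_length (N d : Int) :
    ((pvDiagA N d).length : Int) = max 0 (min (N - 1) d + 1 - max 0 (d - (N - 1))) := by
  unfold pvDiagA
  split <;> simp [PySem.List.length_pyRange_one] <;> omega

-- the r-th element of A's diagonal d is exactly what B computes there
theorem pvDiagA_get (N d r : Int) (h0 : 0 ≤ r)
    (h1 : r < min (N - 1) d - max 0 (d - (N - 1)) + 1) :
    (pvDiagA N d)[r.toNat]? =
      some (let s := max 0 (d - (N - 1)); let e := min (N - 1) d;
            let i := if PySem.Int.mod d 2 == 0 then s + r else e - r; (i, d - i)) := by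
  have hm : PySem.Int.mod d 2 = d % 2 := PySem.Int.mod_eq_emod_of_pos (by omega)
  have h2 : d % 2 = 0 ∨ d % 2 = 1 := Int.emod_two_eq_zero_or_one d
  unfold pvDiagA
  set s := max 0 (d - (N - 1)) with hs
  set e := min (N - 1) d with he
  have hlen : ((PySem.List.pyRange s (e + 1) 1).map
      (fun i => (i, d - i))).length = (e + 1 - s).toNat := by
    simp [PySem.List.length_pyRange_one]
  have hr : r.toNat < (e + 1 - s).toNat := by omega
  rcases h2 with h2 | h2
  · have hb1 : (PySem.Int.mod d 2 == 1) = false := by simp [h2]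
    have hb0 : (PySem.Int.mod d 2 == 0) = true := by simp [h2]
    simp only [hb1, hb0, Bool.false_eq_true, if_false, if_true]
    rw [List.getElem?_map, PySem.List.getElem?_pyRange_one]
    simp only [if_pos hr, Option.map_some]
    congr 2 <;> omega
  · have hb1 : (PySem.Int.mod d 2 == 1) = true := by simp [h2]
    have hb0 : (PySem.Int.mod d 2 == 0) = false := by simp [h2]
    simp only [hb1, hb0, Bool.false_eq_true, if_false, if_true]
    have hrl : r.toNat < ((PySem.List.pyRange s (e + 1) 1).map
        (fun i => (i, d - i))).length := by omega
    rw [List.getElem?_reverse hrl, List.getElem?_map, PySem.List.getElem?_pyRange_one]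
    simp only [hlen]
    have hj : (e + 1 - s).toNat - 1 - r.toNat < (e + 1 - s).toNat := by omega
    simp only [if_pos hj, Option.map_some]
    congr 2 <;> omega

-- B's length scan finds the same element that indexing A's concatenation does
theorem pvAltGo_eq (N : Int) : ∀ (ds : List Int) (k c : Int), c ≤ k →
    (∀ d ∈ ds, 0 ≤ d ∧ d ≤ 2 * N - 2) →
    pvAltGo N k c ds = (PySem.List.pyGet? (ds.flatMap (pvDiagA N)) (k - c)).getD (0, 0) := by
  intro ds
  induction ds with
  | nil => intro k c _ _; simp [pvAltGo, PySem.List.pyGet?]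
  | cons d ds ih =>
    intro k c hck hb
    obtain ⟨hd0, hd1⟩ := hb d (List.mem_cons_self ..)
    have hN : 1 ≤ N := by omega
    simp only [pvAltGo, List.flatMap_cons]
    set s := max 0 (d - (N - 1)) with hs
    set e := min (N - 1) d with he
    have hse : s ≤ e := by omega
    have hlen : ((pvDiagA N d).length : Int) = e - s + 1 := by
      rw [pvDiagA_length]; omega
    by_cases hk : k < c + (e - s + 1)
    · simp only [if_pos hk]
      have h0 : 0 ≤ k - c := by omega
      rw [PySem.List.pyGet?_of_nonneg _ h0,
          List.getElem?_append_left (by omega : (k - c).toNat < (pvDiagA N d).length),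
          pvDiagA_get N d (k - c) h0 (by omega)]
      simp [hs, he]
    · simp only [if_neg hk]
      rw [ih k (c + (e - s + 1)) (by omega)
          (fun x hx => hb x (List.mem_cons_of_mem _ hx))]
      have h0 : 0 ≤ k - c := by omega
      have h0' : 0 ≤ k - (c + (e - s + 1)) := by omega
      rw [PySem.List.pyGet?_of_nonneg _ h0, PySem.List.pyGet?_of_nonneg _ h0',
          List.getElem?_append_right (by omega : (pvDiagA N d).length ≤ (k - c).toNat)]
      clear_value s e
      have hL : (pvDiagA N d).length = (e - s + 1).toNat := by omega
      rw [hL]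
      have hL1 : (1:Int) ≤ e - s + 1 := by omega
      generalize e - s + 1 = L at hL1 hk h0' ⊢
      have hidx : (k - (c + L)).toNat = (k - c).toNat - L.toNat := by omega
      rw [hidx]

-- ===== VERDICT (by name: the statement is the Claim_ definition above) =====
theorem diag_index_to_coords_spec : Claim_equal_diag_index_to_coords := by
  intro k N _ hpre
  obtain ⟨hk0, hkN, hN0⟩ := hpre
  unfold Spec_diag_index_to_coords diag_index_to_coords diag_index_to_coords_alt
  have hg : (k < 0 || N * N ≤ k) = false := by
    simp only [Bool.or_eq_false_iff, decide_eq_false_iff_not]; omega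
  simp only [hg, Bool.false_eq_true, if_false]
  rw [PySem.List.foldl_append_eq_flatMap, List.nil_append,
      pvAltGo_eq N _ k 0 hk0 ?_]
  · norm_num
  · intro d hd
    rw [PySem.List.mem_pyRange_one] at hd
    omega
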